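-- pv_equiv track=rewrite | github.com/vuquan2211/TennisInouT | replay_10s.py | _median3
-- ===== SOURCE A (Python) =====
-- def _median3(pt_prev, pt_cur, pt_next):
--     arr = [p for p in (pt_prev, pt_cur, pt_next) if p is not None]
--     if len(arr) < 2:
--         return pt_cur
--     xs = sorted([p[0] for p in arr])
--     ys = sorted([p[1] for p in arr])
--     xm = xs[len(xs)//2]
--     ym = ys[len(ys)//2]
--     return (xm, ym)
-- ===== SOURCE B (Python) =====
-- def _median3(pt_prev, pt_cur, pt_next):
--     arr = [p for p in (pt_prev, pt_cur, pt_next) if p is not None]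
--     if len(arr) < 2:
--         return pt_cur
--     if len(arr) == 2:
--         (x0, y0), (x1, y1) = arr
--         return (max(x0, x1), max(y0, y1))
--     (x0, y0), (x1, y1), (x2, y2) = arr
--     def med(a, b, c):
--         return max(min(a, b), min(max(a, b), c))
--     return (med(x0, x1, x2), med(y0, y1, y2))
-- ===== Notes on version B (the rewrite author's own statement) =====
-- stated objective: alternative
-- what changed: Replaced building and sorting the coordinate lists and indexing the middle with direct comparison selection: max of two points for the 2-element case, and the max(min(a,b),min(max(a,b),c)) median network for the 3-element case.
import Mathlib
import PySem

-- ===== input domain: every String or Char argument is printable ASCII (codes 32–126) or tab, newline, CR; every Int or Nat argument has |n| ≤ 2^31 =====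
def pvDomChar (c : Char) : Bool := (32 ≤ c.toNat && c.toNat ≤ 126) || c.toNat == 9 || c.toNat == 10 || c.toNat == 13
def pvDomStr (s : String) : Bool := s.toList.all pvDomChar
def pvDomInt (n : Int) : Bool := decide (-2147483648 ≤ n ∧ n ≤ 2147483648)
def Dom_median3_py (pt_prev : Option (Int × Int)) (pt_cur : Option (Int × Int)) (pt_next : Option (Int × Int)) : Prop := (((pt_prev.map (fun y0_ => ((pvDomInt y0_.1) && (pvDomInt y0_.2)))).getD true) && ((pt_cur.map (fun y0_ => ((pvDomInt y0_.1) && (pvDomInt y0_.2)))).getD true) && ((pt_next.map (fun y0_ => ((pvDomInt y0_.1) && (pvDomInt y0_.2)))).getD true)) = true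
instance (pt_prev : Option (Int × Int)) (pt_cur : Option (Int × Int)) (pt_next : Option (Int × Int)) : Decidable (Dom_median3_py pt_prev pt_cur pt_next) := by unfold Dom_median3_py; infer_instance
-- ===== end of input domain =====

-- B replaces sort-then-index-middle with direct comparison selection (max / median network); alternative, not faster.

-- ===== PORT A =====
def median3_py (pt_prev : Option (Int × Int)) (pt_cur : Option (Int × Int)) (pt_next : Option (Int × Int)) : Option (Int × Int) :=
  let arr := [pt_prev, pt_cur, pt_next].filterMap id
  if arr.length < 2 then pt_cur
  else
    let xs := PySem.List.sorted (arr.map Prod.fst) id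
    let ys := PySem.List.sorted (arr.map Prod.snd) id
    match PySem.List.pyGet? xs ((xs.length : Int) / 2), PySem.List.pyGet? ys ((ys.length : Int) / 2) with
    | some xm, some ym => some (xm, ym)
    | _, _ => none    -- unreachable: the lists are nonempty and the index is in range

-- ===== PORT B =====
def median3_py_alt (pt_prev : Option (Int × Int)) (pt_cur : Option (Int × Int)) (pt_next : Option (Int × Int)) : Option (Int × Int) :=
  let arr := [pt_prev, pt_cur, pt_next].filterMap id
  match arr with
  | [(x0, y0), (x1, y1)] => some (max x0 x1, max y0 y1)
  | [(x0, y0), (x1, y1), (x2, y2)] =>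
      some (max (min x0 x1) (min (max x0 x1) x2), max (min y0 y1) (min (max y0 y1) y2))
  | _ => pt_cur

-- ===== PRECONDITION & SPEC =====
def Spec_median3_py (pt_prev : Option (Int × Int)) (pt_cur : Option (Int × Int)) (pt_next : Option (Int × Int)) (out : Option (Int × Int)) : Prop := out = median3_py_alt pt_prev pt_cur pt_next
instance (pt_prev : Option (Int × Int)) (pt_cur : Option (Int × Int)) (pt_next : Option (Int × Int)) (out : Option (Int × Int)) : Decidable (Spec_median3_py pt_prev pt_cur pt_next out) := by unfold Spec_median3_py; infer_instance

-- ===== CLAIM (what is proved, stated in full; the proofs are below) =====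
def Claim_equal_median3_py : Prop := ∀ (pt_prev : Option (Int × Int)) (pt_cur : Option (Int × Int)) (pt_next : Option (Int × Int)), Dom_median3_py pt_prev pt_cur pt_next → Spec_median3_py pt_prev pt_cur pt_next (median3_py pt_prev pt_cur pt_next)

-- ===== LEMMAS AND PROOFS =====

set_option maxHeartbeats 2000000 in
theorem pv_med3 (a b c : Int) :
    PySem.List.pyGet? (PySem.List.sorted [a,b,c] id) 1 = some (max (min a b) (min (max a b) c)) := by
  simp only [PySem.List.sorted, List.foldl, PySem.List.insertBy]
  split_ifs <;>
    simp_all [PySem.List.insertBy, PySem.List.pyGet?, PySem.List.pyIdx?, max_def, min_def] <;>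
    split_ifs <;> simp_all <;> omega

theorem pv_med2 (a b : Int) :
    PySem.List.pyGet? (PySem.List.sorted [a,b] id) 1 = some (max a b) := by
  simp only [PySem.List.sorted, List.foldl, PySem.List.insertBy]
  split_ifs <;>
    simp_all [PySem.List.pyGet?, PySem.List.pyIdx?, max_def]

-- ===== VERDICT (by name: the statement is the Claim_ definition above) =====
theorem pv_med2_get (a b : Int) (h : 1 < (PySem.List.sorted [a,b] id).length) :
    (PySem.List.sorted [a,b] id)[1] = max a b := by
  have := pv_med2 a b
  rw [show ((1 : Int) = ((1 : Nat) : Int)) by norm_num, PySem.List.pyGet?_natCast] at this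
  simpa using this

theorem pv_med3_get (a b c : Int) (h : 1 < (PySem.List.sorted [a,b,c] id).length) :
    (PySem.List.sorted [a,b,c] id)[1] = max (min a b) (min (max a b) c) := by
  have := pv_med3 a b c
  rw [show ((1 : Int) = ((1 : Nat) : Int)) by norm_num, PySem.List.pyGet?_natCast] at this
  simpa using this

theorem median3_py_spec : Claim_equal_median3_py := by
  intro pt_prev pt_cur pt_next _
  unfold Spec_median3_py median3_py median3_py_alt
  rcases pt_prev with _ | ⟨x0, y0⟩ <;> rcases pt_cur with _ | ⟨x1, y1⟩ <;> rcases pt_next with _ | ⟨x2, y2⟩ <;>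
    simp [PySem.List.length_sorted, pv_med2_get, pv_med3_get]
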